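-- pv_equiv track=rewrite | github.com/Linalab-io/vampire-survivor | save.py | _merge_save
-- ===== SOURCE A (Python) =====
-- from copy import deepcopy
--
-- def _merge_save(defaults, loaded):
--     merged = deepcopy(defaults)
--     if not isinstance(loaded, dict):
--         return merged
--     for key, value in loaded.items():
--         if isinstance(value, dict) and isinstance(merged.get(key), dict):
--             merged[key] = _merge_save(merged[key], value)
--         elif key in merged:
--             merged[key] = value
--     return merged
-- ===== SOURCE B (Python) =====
-- from copy import deepcopy
--
-- def _merge_save(defaults, loaded):
--     # One dict comprehension over defaults: take loaded's value when the key is present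
--     # (recursing when both sides are dicts), otherwise a deep copy of the default.
--     # Loaded-only keys are dropped and defaults key order is kept by construction.
--     if not isinstance(loaded, dict):
--         return deepcopy(defaults)
--     return {
--         key: ((_merge_save(dval, loaded[key])
--                if isinstance(dval, dict) and isinstance(loaded[key], dict)
--                else loaded[key])
--               if key in loaded else deepcopy(dval))
--         for key, dval in defaults.items()
--     }
-- ===== Notes on version B (the rewrite author's own statement) =====
-- stated objective: simpler
-- what changed: B is a single dict comprehension over defaults.items() (taking loaded's value when the key is present, recursing only when both sides are dicts), instead of A's deepcopy-the-defaults-then-mutate loop over loaded.items().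
import Mathlib
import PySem

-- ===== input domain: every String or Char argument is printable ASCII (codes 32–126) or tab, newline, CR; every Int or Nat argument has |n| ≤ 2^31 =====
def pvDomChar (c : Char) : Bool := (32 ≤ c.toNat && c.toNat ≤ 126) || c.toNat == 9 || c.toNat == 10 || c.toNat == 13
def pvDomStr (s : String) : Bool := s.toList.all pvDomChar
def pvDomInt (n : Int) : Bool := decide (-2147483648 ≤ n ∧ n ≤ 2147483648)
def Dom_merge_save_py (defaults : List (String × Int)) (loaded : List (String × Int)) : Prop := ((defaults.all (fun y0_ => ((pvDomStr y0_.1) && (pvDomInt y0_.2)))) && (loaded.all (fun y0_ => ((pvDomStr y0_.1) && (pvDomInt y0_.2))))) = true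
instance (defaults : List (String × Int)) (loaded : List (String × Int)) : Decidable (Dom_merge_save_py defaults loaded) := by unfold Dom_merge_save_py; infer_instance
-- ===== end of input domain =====

-- B builds the merged dict with a single dict comprehension over defaults instead of
-- A's deepcopy + in-place mutation over loaded (objective: simpler).
-- Return-value equivalence only; neither program mutates its arguments.

-- ===== PORT A =====
-- Loop body of A: 'isinstance(value, dict) and isinstance(merged.get(key), dict)' is always False
-- at type dict[str, int], so only the 'elif key in merged: merged[key] = value' branch remains.
def mergeStepA (merged : PySem.Dict String Int) (kv : String × Int) : PySem.Dict String Int :=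
  if merged.contains kv.1 then merged.insert kv.1 kv.2 else merged

def merge_save_py (defaults : List (String × Int)) (loaded : List (String × Int)) : List (String × Int) :=
  (loaded.foldl mergeStepA (PySem.Dict.mk defaults)).items

-- ===== PORT B =====
-- B is the dict comprehension '{key: (loaded[key] if key in loaded else dval) for key, dval in defaults.items()}'
-- (the isinstance(..., dict) recursion branch is vacuous at dict[str, int]):
-- the per-entry value is a lookup in loaded, 'key in loaded'/'loaded[key]' rendered as a match on get?;
-- the comprehension itself is Dict.ofList of the mapped pairs.
def merge_save_py_alt (defaults : List (String × Int)) (loaded : List (String × Int)) : List (String × Int) :=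
  (PySem.Dict.ofList (defaults.map (fun kv =>
      (kv.1, match (PySem.Dict.mk loaded).get? kv.1 with
             | some w => w
             | none => kv.2)))).items

-- ===== PRECONDITION & SPEC =====
-- Pre_ excludes association lists with duplicate keys: they do not represent a single Python dict
-- (dict construction collapses duplicates), so either port's treatment of the extra pairs is accidental.
def Pre_merge_save_py (defaults : List (String × Int)) (loaded : List (String × Int)) : Prop :=
  (defaults.map Prod.fst).Nodup ∧ (loaded.map Prod.fst).Nodup
instance (defaults : List (String × Int)) (loaded : List (String × Int)) : Decidable (Pre_merge_save_py defaults loaded) := by unfold Pre_merge_save_py; infer_instance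

def pvWitness_merge_save_py : (List (String × Int)) × (List (String × Int)) :=
  ([("hp", 10), ("gold", 0)], [("gold", 5), ("xp", 3)])

def Spec_merge_save_py (defaults : List (String × Int)) (loaded : List (String × Int)) (out : List (String × Int)) : Prop := out = merge_save_py_alt defaults loaded
instance (defaults : List (String × Int)) (loaded : List (String × Int)) (out : List (String × Int)) : Decidable (Spec_merge_save_py defaults loaded out) := by unfold Spec_merge_save_py; infer_instance

-- ===== CLAIM =====
def Claim_equal_merge_save_py : Prop := ∀ (defaults : List (String × Int)) (loaded : List (String × Int)), Dom_merge_save_py defaults loaded → Pre_merge_save_py defaults loaded → Spec_merge_save_py defaults loaded (merge_save_py defaults loaded)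

-- ===== LEMMAS AND PROOFS =====

-- A's loop never adds a key.
theorem keys_foldl_mergeStepA (l : List (String × Int)) (d : PySem.Dict String Int) :
    (l.foldl mergeStepA d).keys = d.keys := by
  induction l generalizing d with
  | nil => rfl
  | cons a rest ih =>
      simp only [List.foldl_cons]
      rw [ih]
      unfold mergeStepA
      split
      · next h => exact PySem.Dict.keys_insert_of_contains _ _ h
      · rfl

-- Characterisation of A's loop: keys present in d take loaded's (first-match) value.
theorem get?_foldl_mergeStepA (l : List (String × Int)) (hl : (l.map Prod.fst).Nodup)
    (d : PySem.Dict String Int) (k : String) :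
    (l.foldl mergeStepA d).get? k =
      (match (PySem.Dict.mk l).get? k, d.contains k with
        | some w, true => some w
        | _, _ => d.get? k) := by
  induction l generalizing d with
  | nil =>
      simp only [List.foldl_nil]
      have : (PySem.Dict.mk ([] : List (String × Int))).get? k = none := rfl
      rw [this]
  | cons a rest ih =>
      simp only [List.map_cons, List.nodup_cons] at hl
      simp only [List.foldl_cons]
      rw [ih hl.2]
      rw [PySem.Dict.get?_mk_cons]
      by_cases hk : a.1 = k
      · subst hk
        have hrest : (PySem.Dict.mk rest).get? a.1 = none := by
          rw [PySem.Dict.get?_eq_none_iff_not_mem_keys]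
          simpa [PySem.Dict.keys, PySem.Dict.items] using hl.1
        rw [hrest]
        unfold mergeStepA
        by_cases hc : d.contains a.1
        · simp [hc, PySem.Dict.get?_insert_self]
        · simp [hc]
      · have hne : (a.1 == k) = false := by simp [hk]
        rw [hne]
        have hget : (mergeStepA d a).get? k = d.get? k := by
          unfold mergeStepA
          split
          · exact PySem.Dict.get?_insert_of_ne _ _ (fun h => hk h.symm)
          · rfl
        have hcon : (mergeStepA d a).contains k = d.contains k := by
          unfold mergeStepA
          split
          · rw [PySem.Dict.contains_insert]
            have hkk : (k == a.1) = false := by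
              simp only [beq_eq_false_iff_ne, ne_eq]
              exact fun h => hk h.symm
            rw [hkk]
            simp
          · rfl
        rw [hget, hcon]
        simp

-- Dict.ofList of a list with pairwise-distinct keys returns exactly that list as its items.
theorem items_ofList_nodup (l : List (String × Int)) (h : (l.map Prod.fst).Nodup) :
    (PySem.Dict.ofList l).items = l := by
  have := PySem.Dict.items_foldl_insert_fresh l (k := Prod.fst) (v := Prod.snd)
      (d := PySem.Dict.empty) (by intro a _; rfl) h
  simpa [PySem.Dict.ofList, PySem.Dict.update] using this

theorem merge_save_py_spec : Claim_equal_merge_save_py := by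
  intro defaults loaded _ hpre
  obtain ⟨hd, hl⟩ := hpre
  unfold Spec_merge_save_py merge_save_py merge_save_py_alt
  rw [items_ofList_nodup _ (by simpa [List.map_map, Function.comp] using hd)]
  have hkeys : (loaded.foldl mergeStepA (PySem.Dict.mk defaults)).keys = defaults.map Prod.fst := by
    rw [keys_foldl_mergeStepA]; rfl
  have hnd : (loaded.foldl mergeStepA (PySem.Dict.mk defaults)).keys.Nodup := by
    rw [hkeys]; exact hd
  rw [PySem.Dict.items_eq_map_keys _ hnd 0, hkeys, List.map_map]
  apply List.map_congr_left
  intro kv hkv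
  simp only [Function.comp]
  have hd0nd : (PySem.Dict.mk defaults).keys.Nodup := hd
  have hmem : (kv.1, kv.2) ∈ (PySem.Dict.mk defaults).items := hkv
  have hget0 : (PySem.Dict.mk defaults).get? kv.1 = some kv.2 :=
    PySem.Dict.get?_of_mem_items _ hmem hd0nd
  have hcont0 : (PySem.Dict.mk defaults).contains kv.1 = true := by
    rw [PySem.Dict.contains_eq_isSome_get?, hget0]
    rfl
  have hA := get?_foldl_mergeStepA loaded hl (PySem.Dict.mk defaults) kv.1
  rw [hcont0] at hA
  cases hLk : (PySem.Dict.mk loaded).get? kv.1 with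
  | none =>
      rw [hLk, hget0] at hA
      rw [PySem.Dict.getD_of_get?_eq_some _ _ hA]
  | some w =>
      rw [hLk] at hA
      rw [PySem.Dict.getD_of_get?_eq_some _ _ hA]
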